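-- pv_equiv track=rewrite | github.com/hybridpicker/fretboard-position-finder | tests/test_chord_analysis.py | get_canonical_form
-- ===== SOURCE A (Python) =====
-- ENHARMONIC_EQUIVALENTS = {
--     'C#': 'Db', 'Db': 'C#',
--     'D#': 'Eb', 'Eb': 'D#',
--     'F#': 'Gb', 'Gb': 'F#',
--     'G#': 'Ab', 'Ab': 'G#',
--     'A#': 'Bb', 'Bb': 'A#'
-- }
--
-- def get_canonical_form(notes, prefer_flats=True):
--     """
--     Convert a set of notes to a canonical form for comparison.
--
--     Args:
--         notes: The list of notes to convert
--         prefer_flats: If True, convert to flat names; otherwise use sharp names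
--
--     Returns:
--         A set of notes with standardized enharmonic spelling
--     """
--     canon_notes = set()
--     for note in notes:
--         # If this note has an enharmonic equivalent
--         if note in ENHARMONIC_EQUIVALENTS:
--             if prefer_flats:
--                 # Use flat name (e.g., Db instead of C#)
--                 if 'b' in note:  # It's already flat
--                     canon_notes.add(note)
--                 else:  # It's sharp, convert to flat
--                     canon_notes.add(ENHARMONIC_EQUIVALENTS[note])
--             else:
--                 # Use sharp name (e.g., C# instead of Db)
--                 if '#' in note:  # It's already sharp
--                     canon_notes.add(note)
--                 else:  # It's flat, convert to sharp
--                     canon_notes.add(ENHARMONIC_EQUIVALENTS[note])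
--         else:
--             # Natural note, no enharmonic equivalent
--             canon_notes.add(note)
--     return canon_notes
-- ===== SOURCE B (Python) =====
-- _TO_FLAT = {'C#': 'Db', 'D#': 'Eb', 'F#': 'Gb', 'G#': 'Ab', 'A#': 'Bb'}
-- _TO_SHARP = {flat: sharp for sharp, flat in _TO_FLAT.items()}
--
--
-- def get_canonical_form(notes, prefer_flats=True):
--     """Canonicalize enharmonic spellings via a precomputed lookup table.
--
--     Sharps map to flats (or vice versa) through the table; every other
--     note -- naturals and already-canonical spellings -- falls through
--     .get's default unchanged.
--     """
--     canon = _TO_FLAT if prefer_flats else _TO_SHARP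
--     return {canon.get(note, note) for note in notes}
-- ===== Notes on version B (the rewrite author's own statement) =====
-- stated objective: simpler
-- what changed: Replaces the four-way per-note if/else branching over ENHARMONIC_EQUIVALENTS with a single direction-specific canonical-spelling table built once (sharps-to-flats or flats-to-sharps), so the result is one uniform set comprehension {canon.get(note, note) for note in notes}.
import Mathlib
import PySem

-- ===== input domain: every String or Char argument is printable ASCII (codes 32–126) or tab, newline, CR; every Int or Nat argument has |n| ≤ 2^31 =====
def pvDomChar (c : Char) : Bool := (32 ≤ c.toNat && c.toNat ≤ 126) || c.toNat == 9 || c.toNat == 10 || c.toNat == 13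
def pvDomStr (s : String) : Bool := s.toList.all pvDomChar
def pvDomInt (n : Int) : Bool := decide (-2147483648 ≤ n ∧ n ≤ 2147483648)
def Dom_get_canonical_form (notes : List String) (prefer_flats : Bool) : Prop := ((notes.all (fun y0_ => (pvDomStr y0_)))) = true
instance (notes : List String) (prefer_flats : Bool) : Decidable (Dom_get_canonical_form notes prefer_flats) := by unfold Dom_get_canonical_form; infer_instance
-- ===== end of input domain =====

-- B builds one canonical-spelling table up front and does a single uniform lookup pass; objective: simpler.
-- ===== PORT A =====
def ENHARMONIC_EQUIVALENTS : PySem.Dict String String :=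
  PySem.Dict.ofList [("C#", "Db"), ("Db", "C#"),
    ("D#", "Eb"), ("Eb", "D#"),
    ("F#", "Gb"), ("Gb", "F#"),
    ("G#", "Ab"), ("Ab", "G#"),
    ("A#", "Bb"), ("Bb", "A#")]

-- literal port of A: per-note if/else branching, adding into a set accumulator
-- (ENHARMONIC_EQUIVALENTS[note] is ported as getD note note: under the contains
-- check the key is present, so no KeyError is reachable)
def get_canonical_form (notes : List String) (prefer_flats : Bool) : List String :=
  notes.foldl (fun canon_notes note =>
    if ENHARMONIC_EQUIVALENTS.contains note then
      if prefer_flats then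
        if PySem.Str.isIn "b" note then PySem.Set.add canon_notes note
        else PySem.Set.add canon_notes (ENHARMONIC_EQUIVALENTS.getD note note)
      else
        if PySem.Str.isIn "#" note then PySem.Set.add canon_notes note
        else PySem.Set.add canon_notes (ENHARMONIC_EQUIVALENTS.getD note note)
    else PySem.Set.add canon_notes note) PySem.Set.empty

-- ===== PORT B =====
def pvToFlat : PySem.Dict String String :=
  PySem.Dict.ofList [("C#", "Db"), ("D#", "Eb"), ("F#", "Gb"), ("G#", "Ab"), ("A#", "Bb")]

def pvToSharp : PySem.Dict String String :=
  PySem.Dict.ofList (pvToFlat.items.map (fun p => (p.2, p.1)))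

-- port of B: one direction-specific table, one uniform set comprehension
def get_canonical_form_alt (notes : List String) (prefer_flats : Bool) : List String :=
  let canon := if prefer_flats then pvToFlat else pvToSharp
  PySem.Set.ofList (notes.map (fun note => canon.getD note note))

-- ===== PRECONDITION & SPEC =====
def Spec_get_canonical_form (notes : List String) (prefer_flats : Bool) (out : List String) : Prop := out = get_canonical_form_alt notes prefer_flats
instance (notes : List String) (prefer_flats : Bool) (out : List String) : Decidable (Spec_get_canonical_form notes prefer_flats out) := by unfold Spec_get_canonical_form; infer_instance

-- ===== CLAIM (what is proved, stated in full; the proofs are below) =====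
def Claim_equal_get_canonical_form : Prop := ∀ (notes : List String) (prefer_flats : Bool), Dom_get_canonical_form notes prefer_flats → Spec_get_canonical_form notes prefer_flats (get_canonical_form notes prefer_flats)

-- ===== LEMMAS AND PROOFS =====
lemma pv_body_eq (prefer_flats : Bool) (s : List String) (note : String) :
    (if ENHARMONIC_EQUIVALENTS.contains note then
      if prefer_flats then
        if PySem.Str.isIn "b" note then PySem.Set.add s note
        else PySem.Set.add s (ENHARMONIC_EQUIVALENTS.getD note note)
      else
        if PySem.Str.isIn "#" note then PySem.Set.add s note
        else PySem.Set.add s (ENHARMONIC_EQUIVALENTS.getD note note)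
    else PySem.Set.add s note)
    = PySem.Set.add s ((if prefer_flats then pvToFlat else pvToSharp).getD note note) := by
  by_cases h : note ∈ ["C#", "Db", "D#", "Eb", "F#", "Gb", "G#", "Ab", "A#", "Bb"]
  · fin_cases h <;> cases prefer_flats <;> rfl
  · simp only [List.mem_cons, List.not_mem_nil, or_false, not_or] at h
    obtain ⟨h1, h2, h3, h4, h5, h6, h7, h8, h9, h10⟩ := h
    have e : ∀ (a : String), note ≠ a → (a == note) = false := by
      intro a ha; simp only [beq_eq_false_iff_ne, ne_eq]; exact fun hh => ha hh.symm
    have i1 : ENHARMONIC_EQUIVALENTS.items = [("C#", "Db"), ("Db", "C#"), ("D#", "Eb"),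
        ("Eb", "D#"), ("F#", "Gb"), ("Gb", "F#"), ("G#", "Ab"), ("Ab", "G#"),
        ("A#", "Bb"), ("Bb", "A#")] := by decide
    have i2 : pvToFlat.items = [("C#", "Db"), ("D#", "Eb"), ("F#", "Gb"), ("G#", "Ab"),
        ("A#", "Bb")] := by decide
    have i3 : pvToSharp.items = [("Db", "C#"), ("Eb", "D#"), ("Gb", "F#"), ("Ab", "G#"),
        ("Bb", "A#")] := by decide
    cases prefer_flats <;>
      simp [PySem.Dict.contains, PySem.Dict.getD, PySem.Dict.get?, i1, i2, i3,
        List.any_cons, List.find?, e _ h1, e _ h2, e _ h3, e _ h4, e _ h5, e _ h6,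
        e _ h7, e _ h8, e _ h9, e _ h10]


-- ===== VERDICT (by name: the statement is the Claim_ definition above) =====
theorem get_canonical_form_spec : Claim_equal_get_canonical_form := by
  intro notes prefer_flats _
  show get_canonical_form notes prefer_flats = get_canonical_form_alt notes prefer_flats
  unfold get_canonical_form get_canonical_form_alt
  rw [PySem.Set.ofList_eq_foldl, List.foldl_map]
  exact congrFun (congrFun (congrArg _ (funext fun s => funext fun note => pv_body_eq prefer_flats s note)) _) _
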